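-- pv_equiv track=rewrite | github.com/Yena830/2025Spr_projects_Whispers_of_the_Maze | echo_maze.py | cells_between
-- ===== SOURCE A (Python) =====
-- def cells_between(a, b):
--     """Return all cells between a and b (exclusive)."""
--     cells = []
--     x1, y1 = a; x2, y2 = b
--     if x1 == x2:
--         step = 1 if y2 > y1 else -1
--         for y in range(y1 + step, y2, step):
--             cells.append((x1, y))
--     elif y1 == y2:
--         step = 1 if x2 > x1 else -1
--         for x in range(x1 + step, x2, step):
--             cells.append((x, y1))
--     return cells
-- ===== SOURCE B (Python) =====
-- def cells_between(a, b):
--     """Return all cells between a and b (exclusive)."""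
--     if a[0] != b[0] and a[1] != b[1]:
--         return []
--     out = []
--     x, y = b
--     while True:
--         x += (a[0] > x) - (a[0] < x)
--         y += (a[1] > y) - (a[1] < y)
--         if (x, y) == a:
--             break
--         out.append((x, y))
--     out.reverse()
--     return out
-- ===== Notes on version B (the rewrite author's own statement) =====
-- stated objective: alternative
-- what changed: B builds the result back-to-front: it walks backward from b toward a one unit step at a time appending the cells it passes, then reverses the list, instead of A's two axis-specific forward range loops with per-branch step selection.
import Mathlib
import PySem

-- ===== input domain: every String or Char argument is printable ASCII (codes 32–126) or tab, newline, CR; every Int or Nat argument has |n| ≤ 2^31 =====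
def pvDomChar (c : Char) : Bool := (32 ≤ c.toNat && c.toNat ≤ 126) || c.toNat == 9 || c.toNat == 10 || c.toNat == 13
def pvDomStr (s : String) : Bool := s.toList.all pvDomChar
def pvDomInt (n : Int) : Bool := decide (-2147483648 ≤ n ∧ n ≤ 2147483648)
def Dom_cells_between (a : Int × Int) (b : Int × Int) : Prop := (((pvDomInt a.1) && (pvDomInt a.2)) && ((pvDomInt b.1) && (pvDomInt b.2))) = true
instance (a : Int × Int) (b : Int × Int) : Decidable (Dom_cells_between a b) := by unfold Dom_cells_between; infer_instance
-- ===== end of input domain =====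

-- B walks backward from b toward a, appending the strictly-between cells, and reverses at the end
-- (build back-to-front), instead of A's two axis-specific forward range loops (alternative decomposition).

-- ===== PORT A =====
def cells_between (a : Int × Int) (b : Int × Int) : List (Int × Int) :=
  let x1 := a.1; let y1 := a.2; let x2 := b.1; let y2 := b.2
  if x1 = x2 then
    let step : Int := if y2 > y1 then 1 else -1
    (PySem.List.pyRange (y1 + step) y2 step).foldl (fun cells y => cells ++ [(x1, y)]) []
  else if y1 = y2 then
    let step : Int := if x2 > x1 then 1 else -1
    (PySem.List.pyRange (x1 + step) x2 step).foldl (fun cells x => cells ++ [(x, y1)]) []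
  else []

-- ===== PORT B =====
-- the 'while True' loop of Source B: step (x, y) one unit toward a; stop when a is reached, else append.
-- fuel only makes the recursion structural; cells_between_alt passes enough fuel for the walk to finish.
def cbWalk : Nat → (Int × Int) → Int → Int → List (Int × Int) → List (Int × Int)
  | 0, _, _, _, out => out
  | fuel+1, a, x, y, out =>
    if (x + ((if a.1 > x then 1 else 0) - (if a.1 < x then 1 else 0)),
        y + ((if a.2 > y then 1 else 0) - (if a.2 < y then 1 else 0))) = a then out
    else cbWalk fuel a
        (x + ((if a.1 > x then 1 else 0) - (if a.1 < x then 1 else 0)))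
        (y + ((if a.2 > y then 1 else 0) - (if a.2 < y then 1 else 0)))
        (out ++ [(x + ((if a.1 > x then 1 else 0) - (if a.1 < x then 1 else 0)),
                  y + ((if a.2 > y then 1 else 0) - (if a.2 < y then 1 else 0)))])

def cells_between_alt (a : Int × Int) (b : Int × Int) : List (Int × Int) :=
  if a.1 ≠ b.1 ∧ a.2 ≠ b.2 then []
  else (cbWalk ((a.1 - b.1).natAbs + (a.2 - b.2).natAbs + 1) a b.1 b.2 []).reverse

-- ===== PRECONDITION & SPEC =====
def Spec_cells_between (a : Int × Int) (b : Int × Int) (out : List (Int × Int)) : Prop := out = cells_between_alt a b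
instance (a : Int × Int) (b : Int × Int) (out : List (Int × Int)) : Decidable (Spec_cells_between a b out) := by unfold Spec_cells_between; infer_instance

-- ===== CLAIM (what is proved, stated in full; the proofs are below) =====
def Claim_equal_cells_between : Prop := ∀ (a : Int × Int) (b : Int × Int), Dom_cells_between a b → Spec_cells_between a b (cells_between a b)

-- ===== LEMMAS AND PROOFS =====

theorem foldl_append_singleton {α β : Type} (f : α → β) (xs : List α) (acc : List β) :
    xs.foldl (fun cells y => cells ++ [f y]) acc = acc ++ xs.map f := by
  induction xs generalizing acc with
  | nil => simp
  | cons x xs ih => simp [List.foldl, ih]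

-- vertical walk downward toward a (y above a.2): collects y-1, y-2, …, a.2+1
theorem cbWalk_down (x y1 : Int) (n : Nat) (out : List (Int × Int)) :
    cbWalk (n+1) (x, y1) x (y1 + n) out
      = out ++ ((PySem.List.pyRange (y1 + 1) (y1 + n) 1).reverse.map (fun t => (x, t))) := by
  induction n generalizing out with
  | zero =>
    rw [cbWalk, if_pos (by simp)]
    simp [PySem.List.pyRange_one_eq_nil (by omega : (y1 + ((0:Nat):Int)) ≤ y1 + 1)]
  | succ n ih =>
    rw [cbWalk]
    have hx : ((if ((x, y1) : Int × Int).1 > x then (1:Int) else 0)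
        - (if ((x, y1) : Int × Int).1 < x then 1 else 0)) = 0 := by simp
    have hy : ((if ((x, y1) : Int × Int).2 > (y1 + ((n+1 : Nat) : Int)) then (1:Int) else 0)
        - (if ((x, y1) : Int × Int).2 < (y1 + ((n+1 : Nat) : Int)) then 1 else 0)) = -1 := by
      rw [if_neg (by simp <;> omega), if_pos (by simp <;> omega)]; ring
    rw [hx, hy, show x + (0:Int) = x from by ring,
      show (y1 + ((n+1 : Nat) : Int) + -1) = y1 + (n : Nat) from by push_cast; ring]
    rcases Nat.eq_zero_or_pos n with hn | hn
    · subst hn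
      rw [if_pos (by simp)]
      simp [PySem.List.pyRange_one_eq_nil (by omega : (y1 + (((0:Nat)+1 : Nat)):Int) ≤ y1 + 1)]
    · rw [if_neg (by simp <;> omega), ih]
      rw [show (y1 + ((n+1 : Nat) : Int)) = (y1 + (n : Nat)) + 1 from by push_cast; ring,
        PySem.List.pyRange_one_succ_right (by omega)]
      simp

-- vertical walk upward toward a (y below a.2): collects y+1, y+2, …, a.2-1
theorem cbWalk_up (x y1 : Int) (n : Nat) (out : List (Int × Int)) :
    cbWalk (n+1) (x, y1) x (y1 - n) out
      = out ++ ((PySem.List.pyRange (y1 - n + 1) y1 1).map (fun t => (x, t))) := by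
  induction n generalizing out with
  | zero =>
    rw [cbWalk, if_pos (by simp)]
    simp [PySem.List.pyRange_one_eq_nil (by omega : y1 ≤ y1 - ((0:Nat):Int) + 1)]
  | succ n ih =>
    rw [cbWalk]
    have hx : ((if ((x, y1) : Int × Int).1 > x then (1:Int) else 0)
        - (if ((x, y1) : Int × Int).1 < x then 1 else 0)) = 0 := by simp
    have hy : ((if ((x, y1) : Int × Int).2 > (y1 - ((n+1 : Nat) : Int)) then (1:Int) else 0)
        - (if ((x, y1) : Int × Int).2 < (y1 - ((n+1 : Nat) : Int)) then 1 else 0)) = 1 := by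
      rw [if_pos (by simp <;> omega), if_neg (by simp <;> omega)]; ring
    rw [hx, hy, show x + (0:Int) = x from by ring,
      show (y1 - ((n+1 : Nat) : Int) + 1) = y1 - (n : Nat) from by push_cast; ring]
    rcases Nat.eq_zero_or_pos n with hn | hn
    · subst hn
      rw [if_pos (by simp)]
      simp [PySem.List.pyRange_one_eq_nil (by omega : y1 ≤ y1 - ((((0:Nat)+1 : Nat)):Int) + 1)]
    · rw [if_neg (by simp <;> omega), ih,
        PySem.List.pyRange_one_cons (show y1 - ((n : Nat) : Int) < y1 by omega)]
      simp

-- horizontal walk leftward toward a (x right of a.1): collects x-1, …, a.1+1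
theorem cbWalk_left (y x1 : Int) (n : Nat) (out : List (Int × Int)) :
    cbWalk (n+1) (x1, y) (x1 + n) y out
      = out ++ ((PySem.List.pyRange (x1 + 1) (x1 + n) 1).reverse.map (fun t => (t, y))) := by
  induction n generalizing out with
  | zero =>
    rw [cbWalk, if_pos (by simp)]
    simp [PySem.List.pyRange_one_eq_nil (by omega : (x1 + ((0:Nat):Int)) ≤ x1 + 1)]
  | succ n ih =>
    rw [cbWalk]
    have hy : ((if ((x1, y) : Int × Int).2 > y then (1:Int) else 0)
        - (if ((x1, y) : Int × Int).2 < y then 1 else 0)) = 0 := by simp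
    have hx : ((if ((x1, y) : Int × Int).1 > (x1 + ((n+1 : Nat) : Int)) then (1:Int) else 0)
        - (if ((x1, y) : Int × Int).1 < (x1 + ((n+1 : Nat) : Int)) then 1 else 0)) = -1 := by
      rw [if_neg (by simp <;> omega), if_pos (by simp <;> omega)]; ring
    rw [hx, hy, show y + (0:Int) = y from by ring,
      show (x1 + ((n+1 : Nat) : Int) + -1) = x1 + (n : Nat) from by push_cast; ring]
    rcases Nat.eq_zero_or_pos n with hn | hn
    · subst hn
      rw [if_pos (by simp)]
      simp [PySem.List.pyRange_one_eq_nil (by omega : (x1 + (((0:Nat)+1 : Nat)):Int) ≤ x1 + 1)]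
    · rw [if_neg (by simp <;> omega), ih]
      rw [show (x1 + ((n+1 : Nat) : Int)) = (x1 + (n : Nat)) + 1 from by push_cast; ring,
        PySem.List.pyRange_one_succ_right (by omega)]
      simp

-- horizontal walk rightward toward a (x left of a.1): collects x+1, …, a.1-1
theorem cbWalk_right (y x1 : Int) (n : Nat) (out : List (Int × Int)) :
    cbWalk (n+1) (x1, y) (x1 - n) y out
      = out ++ ((PySem.List.pyRange (x1 - n + 1) x1 1).map (fun t => (t, y))) := by
  induction n generalizing out with
  | zero =>
    rw [cbWalk, if_pos (by simp)]
    simp [PySem.List.pyRange_one_eq_nil (by omega : x1 ≤ x1 - ((0:Nat):Int) + 1)]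
  | succ n ih =>
    rw [cbWalk]
    have hy : ((if ((x1, y) : Int × Int).2 > y then (1:Int) else 0)
        - (if ((x1, y) : Int × Int).2 < y then 1 else 0)) = 0 := by simp
    have hx : ((if ((x1, y) : Int × Int).1 > (x1 - ((n+1 : Nat) : Int)) then (1:Int) else 0)
        - (if ((x1, y) : Int × Int).1 < (x1 - ((n+1 : Nat) : Int)) then 1 else 0)) = 1 := by
      rw [if_pos (by simp <;> omega), if_neg (by simp <;> omega)]; ring
    rw [hx, hy, show y + (0:Int) = y from by ring,
      show (x1 - ((n+1 : Nat) : Int) + 1) = x1 - (n : Nat) from by push_cast; ring]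
    rcases Nat.eq_zero_or_pos n with hn | hn
    · subst hn
      rw [if_pos (by simp)]
      simp [PySem.List.pyRange_one_eq_nil (by omega : x1 ≤ x1 - ((((0:Nat)+1 : Nat)):Int) + 1)]
    · rw [if_neg (by simp <;> omega), ih,
        PySem.List.pyRange_one_cons (show x1 - ((n : Nat) : Int) < x1 by omega)]
      simp

-- ===== VERDICT (by name: the statement is the Claim_ definition above) =====
theorem cells_between_spec : Claim_equal_cells_between := by
  intro a b _
  obtain ⟨x1, y1⟩ := a
  obtain ⟨x2, y2⟩ := b
  show cells_between (x1, y1) (x2, y2) = cells_between_alt (x1, y1) (x2, y2)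
  simp only [cells_between, cells_between_alt, foldl_append_singleton, List.nil_append]
  by_cases hx : x1 = x2
  · subst hx
    rw [if_pos rfl]
    rcases (le_or_gt y1 y2 : y1 ≤ y2 ∨ y1 > y2) with hy | hy
    · obtain ⟨n, hn⟩ : ∃ n : Nat, y2 = y1 + n := ⟨(y2 - y1).toNat, by omega⟩
      subst hn
      rw [if_neg (show ¬ (x1 ≠ x1 ∧ y1 ≠ y1 + (n:Nat)) by simp),
        show ((x1 - x1).natAbs + (y1 - (y1 + (n:Nat))).natAbs + 1) = n + 1 from by omega,
        cbWalk_down]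
      by_cases h0 : (0:Nat) < n
      · rw [if_pos (show (y1 + (n:Nat) : Int) > y1 by omega)]
        simp [List.map_reverse]
      · have hz : n = 0 := by omega
        subst hz
        rw [if_neg (show ¬ ((y1 + ((0:Nat):Int)) > y1) by omega),
          PySem.List.pyRange_neg_one_eq_nil (by omega)]
        simp
    · obtain ⟨n, hn⟩ : ∃ n : Nat, y2 = y1 - n := ⟨(y1 - y2).toNat, by omega⟩
      subst hn
      rw [if_neg (show ¬ (x1 ≠ x1 ∧ y1 ≠ y1 - (n:Nat)) by simp),
        show ((x1 - x1).natAbs + (y1 - (y1 - (n:Nat))).natAbs + 1) = n + 1 from by omega,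
        cbWalk_up,
        if_neg (show ¬ ((y1 - (n:Nat) : Int) > y1) by omega),
        PySem.List.pyRange_neg_one_eq_reverse,
        show (y1 + -1 + 1 : Int) = y1 from by ring]
      simp [List.map_reverse]
  · by_cases hy : y1 = y2
    · subst hy
      rw [if_neg hx, if_pos rfl]
      rcases (le_or_gt x1 x2 : x1 ≤ x2 ∨ x1 > x2) with hle | hlt
      · obtain ⟨n, hn⟩ : ∃ n : Nat, x2 = x1 + n := ⟨(x2 - x1).toNat, by omega⟩
        subst hn
        rw [if_neg (show ¬ (x1 ≠ x1 + (n:Nat) ∧ y1 ≠ y1) by simp),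
          show ((x1 - (x1 + (n:Nat))).natAbs + (y1 - y1).natAbs + 1) = n + 1 from by omega,
          cbWalk_left]
        by_cases h0 : (0:Nat) < n
        · rw [if_pos (show (x1 + (n:Nat) : Int) > x1 by omega)]
          simp [List.map_reverse]
        · have hz : n = 0 := by omega
          subst hz
          rw [if_neg (show ¬ ((x1 + ((0:Nat):Int)) > x1) by omega),
            PySem.List.pyRange_neg_one_eq_nil (by omega)]
          simp
      · obtain ⟨n, hn⟩ : ∃ n : Nat, x2 = x1 - n := ⟨(x1 - x2).toNat, by omega⟩
        subst hn
        rw [if_neg (show ¬ (x1 ≠ x1 - (n:Nat) ∧ y1 ≠ y1) by simp),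
          show ((x1 - (x1 - (n:Nat))).natAbs + (y1 - y1).natAbs + 1) = n + 1 from by omega,
          cbWalk_right,
          if_neg (show ¬ ((x1 - (n:Nat) : Int) > x1) by omega),
          PySem.List.pyRange_neg_one_eq_reverse,
          show (x1 + -1 + 1 : Int) = x1 from by ring]
        simp [List.map_reverse]
    · rw [if_neg hx, if_neg hy, if_pos ⟨hx, hy⟩]
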